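-- pv_equiv track=rewrite | github.com/MikeyThacker/Project-Euler | 50 - 59/54. Poker Hands.py | split_hands
-- ===== SOURCE A (Python) =====
-- def split_hands(line):
--     hands = []
--
--     card = ""
--     hand = []
--     count = 0
--     for character in line:
--         if character == " ":
--             continue
--         card += character
--         count += 1
--
--         if count % 2 == 0:
--             hand.append(card)
--             card = ""
--         if len(hand) == 5:
--             hands.append(hand)
--             hand = []
--     return hands
-- ===== SOURCE B (Python) =====
-- def split_hands(line):
--     s = [c for c in line if c != " "]
--     cards = [s[i] + s[i + 1] for i in range(0, len(s) - 1, 2)]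
--     return [cards[i:i + 5] for i in range(0, len(cards) - 4, 5)]
-- ===== Notes on version B (the rewrite author's own statement) =====
-- stated objective: simpler
-- what changed: Replaces A's single interleaved loop with a card-string buffer, a hand buffer and a parity counter by three independent passes: filter out spaces, build the complete 2-char cards by a stepped-range comprehension, and slice the cards into complete 5-card hands by another stepped-range comprehension.
import Mathlib
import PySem

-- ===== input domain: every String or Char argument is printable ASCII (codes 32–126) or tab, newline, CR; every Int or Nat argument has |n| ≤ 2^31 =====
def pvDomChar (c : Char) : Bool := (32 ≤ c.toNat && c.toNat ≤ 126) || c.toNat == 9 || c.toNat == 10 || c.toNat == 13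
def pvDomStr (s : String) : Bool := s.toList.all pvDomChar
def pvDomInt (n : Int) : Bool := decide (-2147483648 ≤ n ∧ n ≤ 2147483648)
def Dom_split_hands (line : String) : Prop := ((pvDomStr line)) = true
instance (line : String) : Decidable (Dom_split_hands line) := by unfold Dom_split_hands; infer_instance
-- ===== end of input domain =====

-- B replaces A's single interleaved counter loop by three independent passes (filter spaces, pair chars into cards, slice cards into hands of five); simpler decomposition, same cost.

-- ===== PORT A =====
-- one step of A's for-loop body; state = (hands, card, hand, count)
def splitHandsStepA (st : List (List String) × String × List String × Int) (character : Char) :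
    List (List String) × String × List String × Int :=
  let (hands, card, hand, count) := st
  if character = ' ' then st
  else
    let card := card.push character
    let count := count + 1
    let (hand, card) :=
      if PySem.Int.mod count 2 = 0 then (hand ++ [card], "") else (hand, card)
    let (hands, hand) :=
      if hand.length = 5 then (hands ++ [hand], ([] : List String)) else (hands, hand)
    (hands, card, hand, count)

def split_hands (line : String) : List (List String) :=
  (line.toList.foldl splitHandsStepA ([], "", [], 0)).1

-- ===== PORT B =====
-- s = [c for c in line if c != " "]
-- cards = [s[i] + s[i + 1] for i in range(0, len(s) - 1, 2)]   (s[i], s[i+1] are always in range for i in this range, so pyGetD's default is never used)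
-- return [cards[i:i + 5] for i in range(0, len(cards) - 4, 5)]
def split_hands_alt (line : String) : List (List String) :=
  let s := line.toList.filter (fun c => c ≠ ' ')
  let cards := (PySem.List.pyRange 0 ((s.length : Int) - 1) 2).map
      (fun i => String.ofList [PySem.List.pyGetD s i ' ', PySem.List.pyGetD s (i + 1) ' '])
  (PySem.List.pyRange 0 ((cards.length : Int) - 4) 5).map
      (fun i => PySem.List.slice cards (some i) (some (i + 5)))

-- ===== PRECONDITION & SPEC =====
def Spec_split_hands (line : String) (out : List (List String)) : Prop := out = split_hands_alt line
instance (line : String) (out : List (List String)) : Decidable (Spec_split_hands line out) := by unfold Spec_split_hands; infer_instance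

-- ===== CLAIM (what is proved, stated in full; the proofs are below) =====
def Claim_equal_split_hands : Prop := ∀ (line : String), Dom_split_hands line → Spec_split_hands line (split_hands line)

-- ===== LEMMAS AND PROOFS =====

-- the common intermediate shape: complete 2-chunks of the chars, complete 5-chunks of the cards
def pairsB : List Char → List String
  | a :: b :: t => String.ofList [a, b] :: pairsB t
  | _ => []

def fivesB : List String → List (List String)
  | a :: b :: c :: d :: e :: t => [a, b, c, d, e] :: fivesB t
  | _ => []

-- A's hand accumulator, expressed over the card list
def fivesAux (hand : List String) : List String → List (List String)
  | [] => []
  | p :: ps =>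
      if (hand ++ [p]).length = 5 then (hand ++ [p]) :: fivesAux [] ps
      else fivesAux (hand ++ [p]) ps

theorem fivesAux_eq_fivesB (ps : List String) :
    ∀ hand : List String, hand.length < 5 → fivesAux hand ps = fivesB (hand ++ ps) := by
  induction ps with
  | nil =>
      intro hand h
      match hand, h with
      | [], _ => rfl
      | [a], _ => rfl
      | [a,b], _ => rfl
      | [a,b,c], _ => rfl
      | [a,b,c,d], _ => rfl
  | cons p ps ih =>
      intro hand h
      by_cases h5 : (hand ++ [p]).length = 5
      · simp only [fivesAux, if_pos h5]
        match hand, h5 with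
        | [a,b,c,d], _ =>
          simpa [fivesB] using ih [] (by simp)
      · simp only [fivesAux, if_neg h5]
        rw [ih (hand ++ [p]) (by simp at h5 ⊢; omega)]
        simp

-- skipping spaces inside the fold = folding over the filtered list
theorem foldl_filter_space (l : List Char) :
    ∀ st : List (List String) × String × List String × Int,
    l.foldl splitHandsStepA st =
      (l.filter (fun c => c ≠ ' ')).foldl splitHandsStepA st := by
  induction l with
  | nil => intro st; rfl
  | cons c t ih =>
      intro st
      by_cases hc : c = ' '
      · subst hc
        simp [splitHandsStepA, List.foldl, ih]
      · simp [List.filter, hc, List.foldl, ih]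

-- A's core invariant: from an even count, an empty card buffer and a partial hand,
-- the fold yields the accumulated hands followed by the 5-chunks of the 2-chunks of the rest
theorem loopA_eq (cs : List Char) (hns : ∀ c ∈ cs, c ≠ ' ') :
    ∀ (hands : List (List String)) (hand : List String) (k : Int), hand.length < 5 →
      (cs.foldl splitHandsStepA (hands, "", hand, 2 * k)).1 =
        hands ++ fivesAux hand (pairsB cs) := by
  match cs with
  | [] => intro hands hand k h; simp [fivesAux, pairsB]
  | [a] =>
      intro hands hand k h
      have ha : a ≠ ' ' := hns a (by simp)
      simp [List.foldl, splitHandsStepA, ha, Nat.ne_of_lt h, fivesAux, pairsB]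
  | a :: b :: t =>
      intro hands hand k h
      have ha : a ≠ ' ' := hns a (by simp)
      have hb : b ≠ ' ' := hns b (by simp)
      have hd : (2 : Int) ∣ 2 * k + 1 + 1 := ⟨k + 1, by ring⟩
      have hcard : ("".push a).push b = String.ofList [a, b] := by
        apply String.toList_inj.mp; simp
      have e1 : splitHandsStepA (hands, "", hand, 2 * k) a =
          (hands, "".push a, hand, 2 * k + 1) := by
        simp [splitHandsStepA, ha, Nat.ne_of_lt h]
      have hrec := loopA_eq t (fun c hc => hns c (by simp [hc]))
      have hk : (2 * k + 1 + 1 : Int) = 2 * (k + 1) := by ring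
      by_cases h5 : (hand ++ [String.ofList [a, b]]).length = 5
      · have e2 : splitHandsStepA (hands, "".push a, hand, 2 * k + 1) b =
            (hands ++ [hand ++ [String.ofList [a, b]]], "", [], 2 * k + 1 + 1) := by
          simp [splitHandsStepA, hb, hcard, hd, h5]
        show ((a :: b :: t).foldl splitHandsStepA (hands, "", hand, 2 * k)).1 = _
        rw [List.foldl_cons, e1, List.foldl_cons, e2, hk,
          hrec (hands ++ [hand ++ [String.ofList [a, b]]]) [] (k + 1) (by simp)]
        have h5p : hand.length = 4 := by simp at h5; omega
        simp [pairsB, fivesAux, h5p]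
      · have h5n : hand.length ≠ 4 := by simp at h5; omega
        have e2 : splitHandsStepA (hands, "".push a, hand, 2 * k + 1) b =
            (hands, "", hand ++ [String.ofList [a, b]], 2 * k + 1 + 1) := by
          simp [splitHandsStepA, hb, hcard, hd, h5n]
        have hlt : (hand ++ [String.ofList [a, b]]).length < 5 := by
          simp at h5 ⊢; omega
        rw [List.foldl_cons, e1, List.foldl_cons, e2, hk,
          hrec hands (hand ++ [String.ofList [a, b]]) (k + 1) hlt]
        simp [pairsB, fivesAux, h5n]
termination_by cs.length

-- B's first comprehension, reduced to Nat-indexed form and then to pairsB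
theorem cards_range_eq (s : List Char) :
    (List.range (s.length / 2)).map
        (fun k => String.ofList [s.getD (2 * k) ' ', s.getD (2 * k + 1) ' ']) = pairsB s := by
  match s with
  | [] => simp [pairsB]
  | [a] => simp [pairsB]
  | a :: b :: t =>
      have hlen : (a :: b :: t).length / 2 = t.length / 2 + 1 := by simp; omega
      rw [hlen, List.range_succ_eq_map, List.map_cons, List.map_map]
      simp only [Function.comp_def, Nat.succ_eq_add_one]
      have : ((List.range (t.length / 2)).map
          (fun k => String.ofList [(a :: b :: t).getD (2 * (k + 1)) ' ',
                                   (a :: b :: t).getD (2 * (k + 1) + 1) ' '])) =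
          (List.range (t.length / 2)).map
          (fun k => String.ofList [t.getD (2 * k) ' ', t.getD (2 * k + 1) ' ']) := by
        apply List.map_congr_left
        intro k _
        have e1 : 2 * (k + 1) = (2 * k) + 1 + 1 := by omega
        rw [e1]
        simp
      rw [this, cards_range_eq t]
      simp [pairsB, List.getD]
termination_by s.length

theorem cards_eq (s : List Char) :
    (PySem.List.pyRange 0 ((s.length : Int) - 1) 2).map
        (fun i => String.ofList [PySem.List.pyGetD s i ' ', PySem.List.pyGetD s (i + 1) ' ']) =
      pairsB s := by
  rw [PySem.List.pyRange_of_pos 0 ((s.length : Int) - 1) (by norm_num), List.map_map]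
  have hcnt : (if (0 : Int) < (s.length : Int) - 1
      then (((s.length : Int) - 1 - 0 + 2 - 1) / 2).toNat else 0) = s.length / 2 := by
    split_ifs with h <;> omega
  rw [hcnt, ← cards_range_eq s]
  apply List.map_congr_left
  intro k _
  have e1 : (0 + 2 * (k : Int)) = ((2 * k : Nat) : Int) := by push_cast; ring
  have e2 : ((2 * k : Nat) : Int) + 1 = ((2 * k + 1 : Nat) : Int) := by push_cast; ring
  simp only [Function.comp_def, e1, e2, PySem.List.pyGetD_natCast]

-- B's second comprehension, reduced to Nat-indexed form and then to fivesB
theorem hands_range_eq (cards : List String) :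
    (List.range (cards.length / 5)).map
        (fun k => List.take 5 (List.drop (5 * k) cards)) = fivesB cards := by
  match cards with
  | [] => simp [fivesB]
  | [a] => simp [fivesB]
  | [a, b] => simp [fivesB]
  | [a, b, c] => simp [fivesB]
  | [a, b, c, d] => simp [fivesB]
  | a :: b :: c :: d :: e :: t =>
      have hlen : (a :: b :: c :: d :: e :: t).length / 5 = t.length / 5 + 1 := by simp; omega
      rw [hlen, List.range_succ_eq_map, List.map_cons, List.map_map]
      have : ((List.range (t.length / 5)).map
          ((fun k => List.take 5 (List.drop (5 * k) (a :: b :: c :: d :: e :: t))) ∘ Nat.succ)) =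
          (List.range (t.length / 5)).map (fun k => List.take 5 (List.drop (5 * k) t)) := by
        apply List.map_congr_left
        intro k _
        have e1 : 5 * (Nat.succ k) = (5 * k) + 5 := by omega
        simp only [Function.comp_def, e1]
        rw [show (5 * k + 5) = 5 * k + 1 + 1 + 1 + 1 + 1 by omega]
        simp [List.drop_succ_cons]
      rw [this, hands_range_eq t]
      simp [fivesB]
termination_by cards.length

theorem hands_eq (cards : List String) :
    (PySem.List.pyRange 0 ((cards.length : Int) - 4) 5).map
        (fun i => PySem.List.slice cards (some i) (some (i + 5))) = fivesB cards := by
  rw [PySem.List.pyRange_of_pos 0 ((cards.length : Int) - 4) (by norm_num), List.map_map]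
  have hcnt : (if (0 : Int) < (cards.length : Int) - 4
      then (((cards.length : Int) - 4 - 0 + 5 - 1) / 5).toNat else 0) = cards.length / 5 := by
    split_ifs with h <;> omega
  rw [hcnt, ← hands_range_eq cards]
  apply List.map_congr_left
  intro k _
  have e1 : (0 + 5 * (k : Int)) = ((5 * k : Nat) : Int) := by push_cast; ring
  have e2 : ((5 * k : Nat) : Int) + 5 = ((5 * k + 5 : Nat) : Int) := by push_cast; ring
  simp only [Function.comp_def, e1, e2, PySem.List.slice_natCast]
  congr 1
  omega

theorem split_hands_alt_eq (line : String) :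
    split_hands_alt line = fivesB (pairsB (line.toList.filter (fun c => c ≠ ' '))) := by
  simp only [split_hands_alt]
  rw [cards_eq, hands_eq]

-- ===== VERDICT (by name: the statement is the Claim_ definition above) =====
theorem split_hands_spec : Claim_equal_split_hands := by
  intro line _
  show split_hands line = split_hands_alt line
  rw [split_hands_alt_eq]
  unfold split_hands
  rw [foldl_filter_space]
  have h0 : (0 : Int) = 2 * 0 := by norm_num
  rw [h0, loopA_eq _ (fun c hc => by simp at hc; simpa using hc.2) [] [] 0 (by simp),
    fivesAux_eq_fivesB _ [] (by simp)]
  simp
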